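-- pv_equiv track=rewrite | github.com/LucasLikesToCode/desubstitution | substitution.py | baseSub
-- ===== SOURCE A (Python) =====
-- abc = 'abcdefghijklmnopqrstuvwxyz'
--
-- def baseSub(text):
--     output = ''
--     tempSub = {' ':' '}
--     abcIndex = 0
--     for letter in text:
--         if letter in tempSub:
--             output += tempSub[letter]
--         else:
--             output += abc[abcIndex]
--             tempSub[letter] = abc[abcIndex]
--             abcIndex += 1
--     return output
-- ===== SOURCE B (Python) =====
-- abc = 'abcdefghijklmnopqrstuvwxyz'
--
-- def baseSub(text):
--     mapping = {' ': ' '}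
--     i = 0
--     for c in dict.fromkeys(text):
--         if c not in mapping:
--             mapping[c] = abc[i]
--             i += 1
--     return ''.join(mapping[c] for c in text)
-- ===== Notes on version B (the rewrite author's own statement) =====
-- stated objective: alternative
-- what changed: B first builds the complete substitution table in one pass over the ordered distinct characters (dict.fromkeys), then translates the text in a separate join pass, instead of A's single scan that interleaves table construction with output building.
import Mathlib
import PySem

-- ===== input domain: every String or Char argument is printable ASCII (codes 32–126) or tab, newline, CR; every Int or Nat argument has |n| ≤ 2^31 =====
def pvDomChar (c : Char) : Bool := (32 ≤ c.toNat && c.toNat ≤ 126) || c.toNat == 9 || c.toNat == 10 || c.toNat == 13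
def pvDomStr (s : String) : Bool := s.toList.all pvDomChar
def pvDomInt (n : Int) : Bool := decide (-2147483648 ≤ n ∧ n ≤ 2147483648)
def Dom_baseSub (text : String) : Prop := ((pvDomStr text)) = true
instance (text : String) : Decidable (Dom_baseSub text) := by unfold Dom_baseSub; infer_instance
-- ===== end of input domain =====

-- B separates table construction (one pass over the ordered distinct characters, dict.fromkeys)
-- from translation (a second pass over the text), instead of A's interleaved single scan; alternative, not faster.

-- the module constant abc
def pvAbc : List Char := "abcdefghijklmnopqrstuvwxyz".toList

-- ===== PORT A =====
-- A's loop: output, tempSub and abcIndex threaded through the text; abc[abcIndex] out of range = IndexError → none (excluded by Pre_)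
def pvALoop : List Char → List Char → PySem.Dict Char Char → Int → Option (List Char)
  | [], out, _, _ => some out
  | c :: cs, out, d, i =>
    match d.get? c with
    | some v => pvALoop cs (out ++ [v]) d i
    | none =>
      match PySem.List.pyGet? pvAbc i with
      | some ch => pvALoop cs (out ++ [ch]) (d.insert c ch) (i + 1)
      | none => none

def baseSub (text : String) : String :=
  String.ofList ((pvALoop text.toList [] (PySem.Dict.ofList [(' ', ' ')]) 0).getD [])

-- ===== PORT B =====
-- B's first pass: build the mapping over dict.fromkeys(text) (= PySem.List.dedup); none = IndexError
def pvBBuild : List Char → PySem.Dict Char Char → Int → Option (PySem.Dict Char Char)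
  | [], d, _ => some d
  | c :: cs, d, i =>
    if d.contains c then pvBBuild cs d i
    else
      match PySem.List.pyGet? pvAbc i with
      | some ch => pvBBuild cs (d.insert c ch) (i + 1)
      | none => none

-- second pass: ''.join(mapping[c] for c in text); every c of text is a key of the built mapping,
-- so getD's default is never read (mapping[c] never raises in Python B)
def baseSub_alt (text : String) : String :=
  match pvBBuild (PySem.List.dedup text.toList) (PySem.Dict.ofList [(' ', ' ')]) 0 with
  | some d => String.ofList (text.toList.map (fun c => d.getD c ' '))
  | none => ""

-- ===== PRECONDITION & SPEC =====
-- Pre_ excludes exactly the inputs with more than 26 distinct non-space characters, on which Python A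
-- (and Python B) raise IndexError (abc[abcIndex] with abcIndex ≥ 26).
def Pre_baseSub (text : String) : Prop :=
  ((PySem.List.dedup text.toList).filter (fun c => c ≠ ' ')).length ≤ 26
instance (text : String) : Decidable (Pre_baseSub text) := by unfold Pre_baseSub; infer_instance

def pvWitness_baseSub : String := "hello world"

def Spec_baseSub (text : String) (out : String) : Prop := out = baseSub_alt text
instance (text : String) (out : String) : Decidable (Spec_baseSub text out) := by unfold Spec_baseSub; infer_instance

-- ===== CLAIM (what is proved, stated in full; the proofs are below) =====
def Claim_equal_baseSub : Prop := ∀ (text : String), Dom_baseSub text → Pre_baseSub text → Spec_baseSub text (baseSub text)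

-- ===== LEMMAS AND PROOFS =====

-- stability: pvBBuild only inserts keys not yet present, so existing bindings survive
theorem pvBBuild_stable : ∀ (cs : List Char) (d : PySem.Dict Char Char) (i : Int)
    (d' : PySem.Dict Char Char), pvBBuild cs d i = some d' →
    ∀ (c v : Char), d.get? c = some v → d'.get? c = some v := by
  intro cs
  induction cs with
  | nil => intro d i d' h c v hv; simp [pvBBuild] at h; subst h; exact hv
  | cons c₀ cs ih =>
    intro d i d' h c v hv
    simp only [pvBBuild] at h
    by_cases hc : d.contains c₀ = true
    · rw [if_pos hc] at h; exact ih _ _ _ h _ _ hv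
    · rw [if_neg hc] at h
      cases hg : PySem.List.pyGet? pvAbc i with
      | none => rw [hg] at h; cases h
      | some ch =>
        rw [hg] at h
        have hne : c ≠ c₀ := by
          intro he; subst he
          rw [(PySem.Dict.get?_eq_none_iff_contains d c).mpr (by simpa using hc)] at hv
          cases hv
        exact ih _ _ _ h _ _ (by rw [PySem.Dict.get?_insert_of_ne _ _ hne]; exact hv)

-- main: A's interleaved loop equals B's build pass followed by a map over the same characters
theorem pvALoop_eq_bBuild : ∀ (cs out : List Char) (d : PySem.Dict Char Char) (i : Int),
    pvALoop cs out d i =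
      (pvBBuild cs d i).map (fun d' => out ++ cs.map (fun c => d'.getD c ' ')) := by
  intro cs
  induction cs with
  | nil => intro out d i; simp [pvALoop, pvBBuild]
  | cons c cs ih =>
    intro out d i
    cases hv : d.get? c with
    | some v =>
      have hc : d.contains c = true := by
        by_contra h
        rw [(PySem.Dict.get?_eq_none_iff_contains d c).mpr (by simpa using h)] at hv
        cases hv
      simp only [pvALoop, pvBBuild, hv, if_pos hc, ih]
      cases hb : pvBBuild cs d i with
      | none => rfl
      | some d' =>
        have hd' : d'.get? c = some v := pvBBuild_stable cs d i d' hb c v hv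
        simp [PySem.Dict.getD_eq_get?_getD, hd']
    | none =>
      have hc : d.contains c = false := by
        simpa using (PySem.Dict.get?_eq_none_iff_contains d c).mp hv
      simp only [pvALoop, pvBBuild, hv, hc]
      cases hg : PySem.List.pyGet? pvAbc i with
      | none => rfl
      | some ch =>
        simp only [ih]
        cases hb : pvBBuild cs (d.insert c ch) (i + 1) with
        | none => rfl
        | some d' =>
          have hd' : d'.get? c = some ch :=
            pvBBuild_stable cs (d.insert c ch) (i + 1) d' hb c ch
              (PySem.Dict.get?_insert_self d c ch)
          simp [PySem.Dict.getD_eq_get?_getD, hd']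

-- skipping every occurrence of an already-mapped key does not change the build
theorem pvBBuild_filter : ∀ (l : List Char) (d : PySem.Dict Char Char) (i : Int) (c : Char),
    d.contains c = true →
    pvBBuild (l.filter (fun y => !(y == c))) d i = pvBBuild l d i := by
  intro l
  induction l with
  | nil => intro d i c _; rfl
  | cons y l ih =>
    intro d i c hc
    by_cases hy : y = c
    · subst hy
      rw [show List.filter (fun y' => !(y' == y)) (y :: l) = List.filter (fun y' => !(y' == y)) l by
            simp]
      conv_rhs => rw [pvBBuild]
      rw [if_pos hc]
      exact ih d i y hc
    · simp only [List.filter_cons, show (!(y == c)) = true by simp [hy], if_pos]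
      simp only [pvBBuild]
      by_cases hyd : d.contains y = true
      · rw [if_pos hyd, if_pos hyd]; exact ih d i c hc
      · rw [if_neg hyd, if_neg hyd]
        cases hg : PySem.List.pyGet? pvAbc i with
        | none => rfl
        | some ch =>
          dsimp only
          exact ih (d.insert y ch) (i + 1) c
            (by rw [PySem.Dict.contains_insert]; simp [hc])

-- set(xs)-style first-occurrence dedup, one cons step (derived from PySem.Set.update_eq_append_filter)
theorem pvOfList_cons (c : Char) (cs : List Char) :
    PySem.Set.ofList (c :: cs) = c :: (PySem.Set.ofList cs).filter (fun y => !(y == c)) := by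
  have h1 : PySem.Set.ofList (c :: cs) = PySem.Set.update [c] cs := by
    rw [PySem.Set.ofList_eq_foldl, PySem.Set.update]
    rfl
  rw [h1, PySem.Set.update_eq_append_filter]
  have h2 : (fun y : Char => !(PySem.Set.contains [c] y)) = fun y => !(y == c) := by
    funext y; simp only [PySem.Set.contains, List.contains_cons, List.contains_nil,
      Bool.or_false, Bool.beq_eq_decide_eq]
  rw [h2]
  rfl

-- building over the deduplicated list equals building over the full text
theorem pvBBuild_dedup : ∀ (cs : List Char) (d : PySem.Dict Char Char) (i : Int),
    pvBBuild (PySem.Set.ofList cs) d i = pvBBuild cs d i := by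
  intro cs
  induction cs with
  | nil => intro d i; rfl
  | cons c cs ih =>
    intro d i
    rw [pvOfList_cons]
    simp only [pvBBuild]
    by_cases hc : d.contains c = true
    · rw [if_pos hc, if_pos hc, pvBBuild_filter _ _ _ _ hc, ih]
    · rw [if_neg hc, if_neg hc]
      cases hg : PySem.List.pyGet? pvAbc i with
      | none => rfl
      | some ch =>
        dsimp only
        rw [pvBBuild_filter _ _ _ _ (by rw [PySem.Dict.contains_insert]; simp), ih]

-- ===== VERDICT (by name: the statement is the Claim_ definition above) =====
theorem baseSub_spec : Claim_equal_baseSub := by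
  intro text _ _
  unfold Spec_baseSub baseSub baseSub_alt
  rw [PySem.List.dedup_eq_ofList, pvBBuild_dedup, pvALoop_eq_bBuild]
  cases hb : pvBBuild text.toList (PySem.Dict.ofList [(' ', ' ')]) 0 with
  | none => rfl
  | some d' => simp
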